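-- pv_equiv track=rewrite | github.com/marians002/IA-Sim-MLB-Prediction | genetic/geneticA.py | fill_positions
-- ===== SOURCE A (Python) =====
-- def fill_positions(child, parent):
--     for elem in parent:
--         if elem not in child:
--             putted = False
--             for i in range(len(child)):
--                 if child[i] is None:
--                     putted = True
--                     child[i] = elem
--                 if putted: break
--
--     return child
-- ===== SOURCE B (Python) =====
-- def fill_positions(child, parent):
--     # compute the insertion list once, then assign into the None slots
--     present = set(child)
--     fillers = []
--     for elem in parent:
--         if elem not in present:
--             fillers.append(elem)
--             present.add(elem)
--     j = 0
--     for i in range(len(child)):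
--         if j == len(fillers):
--             break
--         if child[i] is None:
--             child[i] = fillers[j]
--             j += 1
--     return child
-- ===== Notes on version B (the rewrite author's own statement) =====
-- stated objective: faster
-- what changed: Replaces A's per-parent-element list membership scan and first-None rescans with one pass that collects the fillers against a hash set and a second pass that assigns them into the None slots.
import Mathlib
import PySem

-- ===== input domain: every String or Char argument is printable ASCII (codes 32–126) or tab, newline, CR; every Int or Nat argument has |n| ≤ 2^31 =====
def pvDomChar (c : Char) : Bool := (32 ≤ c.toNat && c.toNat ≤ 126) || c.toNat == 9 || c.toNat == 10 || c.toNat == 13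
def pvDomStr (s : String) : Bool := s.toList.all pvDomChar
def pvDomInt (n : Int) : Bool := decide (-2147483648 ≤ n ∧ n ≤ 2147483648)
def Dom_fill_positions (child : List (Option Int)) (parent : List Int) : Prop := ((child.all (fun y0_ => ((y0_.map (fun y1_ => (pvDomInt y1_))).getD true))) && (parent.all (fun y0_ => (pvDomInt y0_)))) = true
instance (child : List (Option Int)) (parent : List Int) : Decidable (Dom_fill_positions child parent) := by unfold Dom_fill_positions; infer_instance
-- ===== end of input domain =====

-- B replaces A's per-element list-membership scan and first-None rescan by one
-- dedup pass collecting fillers against a set, then one assignment pass over the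
-- None slots.  Both Pythons mutate `child` in place; the theorem is about the
-- RETURN value (identical to the mutated list in both).

-- ===== PORT A =====
-- inner loop of A: scan child by index, write elem into the first None slot
-- (putted/break ⇒ stop right after the first None); no None ⇒ unchanged
def pvFillFirstNone : List (Option Int) → Int → List (Option Int)
  | [], _ => []
  | none :: rest, e => some e :: rest
  | some x :: rest, e => some x :: pvFillFirstNone rest e

def fill_positions (child : List (Option Int)) (parent : List Int) : List (Option Int) :=
  parent.foldl (fun c elem => if some elem ∈ c then c else pvFillFirstNone c elem) child

-- ===== PORT B =====
-- second loop of Source B: walk child, putting the next unused filler into each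
-- None slot, breaking when the fillers run out
def pvAssign : List (Option Int) → List Int → List (Option Int)
  | c, [] => c
  | [], _ => []
  | none :: rest, f :: fs => some f :: pvAssign rest fs
  | some x :: rest, fs => some x :: pvAssign rest fs

def fill_positions_alt (child : List (Option Int)) (parent : List Int) : List (Option Int) :=
  -- first loop of Source B: present = set(child); collect fillers, updating present
  let fillers :=
    (parent.foldl
      (fun (st : PySem.Set (Option Int) × List Int) elem =>
        if PySem.Set.contains st.1 (some elem) then st
        else (PySem.Set.add st.1 (some elem), st.2 ++ [elem]))
      (PySem.Set.ofList child, [])).2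
  pvAssign child fillers

-- ===== PRECONDITION & SPEC =====
def Spec_fill_positions (child : List (Option Int)) (parent : List Int) (out : List (Option Int)) : Prop := out = fill_positions_alt child parent
instance (child : List (Option Int)) (parent : List Int) (out : List (Option Int)) : Decidable (Spec_fill_positions child parent out) := by unfold Spec_fill_positions; infer_instance

-- ===== CLAIM (what is proved, stated in full; the proofs are below) =====
def Claim_equal_fill_positions : Prop := ∀ (child : List (Option Int)) (parent : List Int), Dom_fill_positions child parent → Spec_fill_positions child parent (fill_positions child parent)

-- ===== LEMMAS AND PROOFS =====

-- cons-recursive reshaping of B's filler-collecting fold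
def pvCollect (s : PySem.Set (Option Int)) : List Int → List Int
  | [] => []
  | e :: rest =>
    if PySem.Set.contains s (some e) then pvCollect s rest
    else e :: pvCollect (PySem.Set.add s (some e)) rest

theorem pvCollect_foldl (parent : List Int) (s : PySem.Set (Option Int)) (acc : List Int) :
    (parent.foldl
      (fun (st : PySem.Set (Option Int) × List Int) elem =>
        if PySem.Set.contains st.1 (some elem) then st
        else (PySem.Set.add st.1 (some elem), st.2 ++ [elem]))
      (s, acc)).2 = acc ++ pvCollect s parent := by
  induction parent generalizing s acc with
  | nil => simp [pvCollect]
  | cons e rest ih =>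
    by_cases h : some e ∈ s
    · simpa [pvCollect, h] using ih s acc
    · simpa [pvCollect, h, PySem.Set.add_eq_ite] using
        ih (PySem.Set.add s (some e)) (acc ++ [e])

theorem mem_pvFillFirstNone_of_mem (c : List (Option Int)) (e x : Int)
    (h : some x ∈ c) : some x ∈ pvFillFirstNone c e := by
  induction c with
  | nil => simp at h
  | cons a rest ih =>
    cases a with
    | none =>
      simp [pvFillFirstNone] at h ⊢
      exact Or.inr h
    | some y =>
      simp [pvFillFirstNone] at h ⊢
      rcases h with h | h
      · exact Or.inl h
      · exact Or.inr (by simpa using ih h)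

theorem mem_of_mem_pvFillFirstNone (c : List (Option Int)) (e : Int) (y : Option Int)
    (h : y ∈ pvFillFirstNone c e) : y ∈ c ∨ y = some e := by
  induction c with
  | nil => simp [pvFillFirstNone] at h
  | cons a rest ih =>
    cases a with
    | none =>
      simp [pvFillFirstNone] at h
      rcases h with h | h
      · exact Or.inr h
      · exact Or.inl (by simp [h])
    | some x =>
      simp [pvFillFirstNone] at h
      rcases h with h | h
      · exact Or.inl (by simp [h])
      · rcases ih h with h' | h'
        · exact Or.inl (by simp [h'])
        · exact Or.inr h'

theorem pvFillFirstNone_of_no_none (c : List (Option Int)) (e : Int)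
    (h : none ∉ c) : pvFillFirstNone c e = c := by
  induction c with
  | nil => rfl
  | cons a rest ih =>
    cases a with
    | none => simp at h
    | some x =>
      simp only [pvFillFirstNone, List.cons.injEq, true_and]
      exact ih (fun hc => h (by simp [hc]))

theorem mem_pvFillFirstNone_self (c : List (Option Int)) (e : Int)
    (h : none ∈ c) : some e ∈ pvFillFirstNone c e := by
  induction c with
  | nil => simp at h
  | cons a rest ih =>
    cases a with
    | none => simp [pvFillFirstNone]
    | some x =>
      simp [pvFillFirstNone]
      exact Or.inr (ih (by simpa using h))

theorem pvAssign_nil (c : List (Option Int)) : pvAssign c [] = c := by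
  cases c <;> rfl

theorem pvAssign_cons (c : List (Option Int)) (e : Int) (fs : List Int) :
    pvAssign c (e :: fs) = pvAssign (pvFillFirstNone c e) fs := by
  induction c with
  | nil => cases fs <;> rfl
  | cons a rest ih =>
    cases a with
    | none => cases fs <;> simp [pvAssign, pvFillFirstNone, pvAssign_nil]
    | some x =>
      cases fs with
      | nil => simp [pvAssign, pvFillFirstNone, pvAssign_nil, ih]
      | cons f fs' => simp [pvAssign, pvFillFirstNone, ih]

-- the invariant tying A's live child to B's present set
def pvInv (c : List (Option Int)) (s : PySem.Set (Option Int)) : Prop :=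
  (∀ e : Int, some e ∈ c → some e ∈ s) ∧ (∀ e : Int, some e ∈ s → some e ∈ c ∨ none ∉ c)

theorem pv_main (parent : List Int) (c : List (Option Int)) (s : PySem.Set (Option Int))
    (hinv : pvInv c s) :
    parent.foldl (fun c elem => if some elem ∈ c then c else pvFillFirstNone c elem) c
      = pvAssign c (pvCollect s parent) := by
  induction parent generalizing c s with
  | nil => simp [pvCollect, pvAssign_nil]
  | cons e rest ih =>
    simp only [List.foldl_cons, pvCollect]
    by_cases hs : PySem.Set.contains s (some e)
    · have hmem : some e ∈ s := (PySem.Set.contains_iff s (some e)).mp hs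
      rw [if_pos hs]
      have hceq : (if some e ∈ c then c else pvFillFirstNone c e) = c := by
        rcases hinv.2 e hmem with hc | hnone
        · rw [if_pos hc]
        · by_cases hc : some e ∈ c
          · rw [if_pos hc]
          · rw [if_neg hc, pvFillFirstNone_of_no_none c e hnone]
      rw [hceq]
      exact ih c s hinv
    · have hns : some e ∉ s := fun h => hs ((PySem.Set.contains_iff s (some e)).mpr h)
      have hnc : some e ∉ c := fun h => hns (hinv.1 e h)
      rw [if_neg hs, if_neg hnc, pvAssign_cons]
      apply ih
      constructor
      · intro x hx
        rcases mem_of_mem_pvFillFirstNone c e (some x) hx with h | h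
        · exact (PySem.Set.mem_add s (some e) (some x)).mpr (Or.inl (hinv.1 x h))
        · exact (PySem.Set.mem_add s (some e) (some x)).mpr (Or.inr h)
      · intro x hx
        rcases (PySem.Set.mem_add s (some e) (some x)).mp hx with h | h
        · rcases hinv.2 x h with h' | h'
          · exact Or.inl (mem_pvFillFirstNone_of_mem c e x h')
          · rw [pvFillFirstNone_of_no_none c e h']
            exact Or.inr h'
        · have hxe : x = e := by simpa using h
          subst hxe
          by_cases hn : none ∈ c
          · exact Or.inl (mem_pvFillFirstNone_self c x hn)
          · rw [pvFillFirstNone_of_no_none c x hn]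
            exact Or.inr hn

-- ===== VERDICT (by name: the statement is the Claim_ definition above) =====
theorem fill_positions_spec : Claim_equal_fill_positions := by
  intro child parent _
  unfold Spec_fill_positions fill_positions fill_positions_alt
  rw [pvCollect_foldl parent (PySem.Set.ofList child) []]
  simp only [List.nil_append]
  apply pv_main
  constructor
  · intro e he; exact (PySem.Set.mem_ofList child (some e)).mpr he
  · intro e he; exact Or.inl ((PySem.Set.mem_ofList child (some e)).mp he)
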